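-- pv_equiv track=rewrite | github.com/Dirtytrii/leetcodePython | 蓝桥杯备赛/学习/双指针/leetcode——33.py | search
-- ===== SOURCE A (Python) =====
-- from typing import List
--
-- def search(nums: List[int], target: int) -> int:
--     nums.sort()
--     left = 0
--     n = len(nums)
--     right = n - 1
--
--     while left <= right:
--         mid = int((left + right) / 2)
--
--         if nums[mid] > target:
--             right = mid - 1
--         elif nums[mid] < target:
--             left = mid + 1
--         else:
--             return mid
--
--     return -1
-- ===== SOURCE B (Python) =====
-- from typing import List
--
-- def search(nums: List[int], target: int) -> int:
--     # sort in place (same mutation as A), then a plain linear membership/index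
--     # lookup instead of a binary search.
--     nums.sort()
--     try:
--         return nums.index(target)
--     except ValueError:
--         return -1
-- ===== Notes on version B (the rewrite author's own statement) =====
-- stated objective: idiomatic
-- what changed: Replaced the hand-written binary search after the sort with a plain linear list.index lookup (try/except ValueError), removing the interval loop entirely.
-- outside the precondition, e.g. on search([1, 1, 1], 1): A returns 1, B returns 0
import Mathlib
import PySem

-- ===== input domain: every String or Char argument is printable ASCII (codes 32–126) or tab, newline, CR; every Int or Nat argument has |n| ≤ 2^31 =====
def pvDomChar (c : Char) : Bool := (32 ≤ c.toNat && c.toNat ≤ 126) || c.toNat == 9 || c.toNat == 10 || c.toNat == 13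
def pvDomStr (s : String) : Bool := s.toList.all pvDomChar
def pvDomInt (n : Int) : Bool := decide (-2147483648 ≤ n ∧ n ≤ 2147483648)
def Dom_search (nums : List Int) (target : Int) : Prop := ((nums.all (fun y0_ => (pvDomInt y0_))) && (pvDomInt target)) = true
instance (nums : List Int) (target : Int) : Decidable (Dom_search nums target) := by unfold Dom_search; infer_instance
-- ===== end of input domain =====

-- B replaces A's hand-written binary search (after the sort) by a plain linear list.index
-- lookup; both sort the argument in place (same side effect), the equivalence proved is
-- about the return value.

-- ===== PORT A =====
-- A's while-loop as recursion on the interval; mid = int((left+right)/2) is ported as floor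
-- division, exact here because left + right ≥ 0 in every reachable state (left starts at 0 and
-- never decreases) and the magnitudes are far below float-precision limits.
-- fuel is only a totality device: it bounds the interval width, which shrinks every iteration,
-- so with fuel = length + 1 the 0-fuel branch is never reached.
def searchGo (xs : List Int) (target : Int) : Nat → Int → Int → Int
  | 0, _, _ => -1
  | fuel + 1, left, right =>
    if left ≤ right then
      let mid := PySem.Int.floordiv (left + right) 2
      if (PySem.List.pyGet? xs mid).getD 0 > target then searchGo xs target fuel left (mid - 1)
      else if (PySem.List.pyGet? xs mid).getD 0 < target then searchGo xs target fuel (mid + 1) right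
      else mid
    else -1

def search (nums : List Int) (target : Int) : Int :=
  let xs := PySem.List.sorted nums (fun x => x) false
  searchGo xs target (xs.length + 1) 0 ((xs.length : Int) - 1)

-- ===== PORT B =====
-- Source B: nums.sort(); return nums.index(target), with ValueError (index? = none) mapped to -1
def search_alt (nums : List Int) (target : Int) : Int :=
  let xs := PySem.List.sorted nums (fun x => x) false
  match PySem.List.index? xs target with
  | some i => (i : Int)
  | none => -1

-- ===== PRECONDITION & SPEC =====
-- Pre_ excludes inputs on which target occurs more than once in nums: there the index returned
-- among the duplicate occurrences is an accidental tie (A returns a mid-path occurrence, B the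
-- first occurrence), and neither choice is more specified than the other.
def Pre_search (nums : List Int) (target : Int) : Prop := nums.count target ≤ 1
instance (nums : List Int) (target : Int) : Decidable (Pre_search nums target) := by
  unfold Pre_search; infer_instance

def pvWitness_search : List Int × Int := ([3, 1, 2], 2)

def Spec_search (nums : List Int) (target : Int) (out : Int) : Prop := out = search_alt nums target
instance (nums : List Int) (target : Int) (out : Int) : Decidable (Spec_search nums target out) := by unfold Spec_search; infer_instance

-- ===== CLAIM (what is proved, stated in full; the proofs are below) =====
def Claim_equal_search : Prop := ∀ (nums : List Int) (target : Int), Dom_search nums target → Pre_search nums target → Spec_search nums target (search nums target)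

-- ===== LEMMAS AND PROOFS =====

-- monotonicity of a ≤-sorted list at two indices
theorem sorted_mono {xs : List Int} (hs : xs.Pairwise (· ≤ ·)) {i j : Nat}
    (hij : i ≤ j) (hj : j < xs.length) : xs[i]'(by omega) ≤ xs[j] := by
  rcases Nat.lt_or_eq_of_le hij with h | h
  · exact List.pairwise_iff_getElem.mp hs i j (by omega) hj h
  · subst h; exact le_refl _

-- indexing with a nonnegative in-range Int index
theorem pyGet_getD (xs : List Int) (i : Int) (h0 : 0 ≤ i) (h : i.toNat < xs.length) :
    (PySem.List.pyGet? xs i).getD 0 = xs[i.toNat]'h := by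
  have hi : i = ((i.toNat : Nat) : Int) := by omega
  have h1 : PySem.List.pyGet? xs i = xs[i.toNat]? := by
    conv_lhs => rw [hi]
    simp only [PySem.List.pyGet?_natCast]
  rw [h1, List.getElem?_eq_getElem h]
  rfl

-- A's loop: with all occurrences of target confined to [left, right], the loop returns
-- the index of an occurrence, or -1 when there is no occurrence at all.
theorem searchGo_char (xs : List Int) (t : Int) (hs : xs.Pairwise (· ≤ ·)) :
    ∀ n : Nat, ∀ left right : Int, (right + 1 - left).toNat ≤ n →
      0 ≤ left → right < (xs.length : Int) →
      (∀ i : Nat, (hi : i < xs.length) → xs[i] = t → left ≤ (i : Int) ∧ (i : Int) ≤ right) →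
      (searchGo xs t n left right = -1 ∧ ∀ i : Nat, (hi : i < xs.length) → xs[i] ≠ t) ∨
      (∃ i : Nat, ∃ hi : i < xs.length, searchGo xs t n left right = (i : Int) ∧ xs[i] = t) := by
  intro n
  induction n with
  | zero =>
    intro left right hn h0 hr hinv
    exact Or.inl ⟨rfl, fun i hi hit => by have := hinv i hi hit; omega⟩
  | succ n ih =>
    intro left right hn h0 hr hinv
    by_cases hlr : left ≤ right
    · simp only [searchGo, if_pos hlr]
      set m := PySem.Int.floordiv (left + right) 2 with hm
      have hfd : m = (left + right) / 2 := by
        rw [hm]; exact PySem.Int.floordiv_eq_ediv_of_pos (by norm_num)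
      have hml : left ≤ m := by omega
      have hmr : m ≤ right := by omega
      have hmlen : m.toNat < xs.length := by omega
      rw [pyGet_getD xs m (by omega) (by omega)]
      split_ifs with h1 h2
      · -- xs[mid] > target : recurse on the left half
        refine ih left (m - 1) (by omega) h0 (by omega) ?_
        intro i hi hit
        refine ⟨(hinv i hi hit).1, ?_⟩
        by_contra hgt
        have hmono := sorted_mono hs (show m.toNat ≤ i by omega) hi
        omega
      · -- xs[mid] < target : recurse on the right half
        refine ih (m + 1) right (by omega) (by omega) hr ?_
        intro i hi hit
        refine ⟨?_, (hinv i hi hit).2⟩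
        by_contra hlt
        have hmono := sorted_mono hs (show i ≤ m.toNat by omega) hmlen
        omega
      · -- found
        exact Or.inr ⟨m.toNat, hmlen, by omega, by omega⟩
    · exact Or.inl ⟨by simp [searchGo, hlr], fun i hi hit => by have := hinv i hi hit; omega⟩

-- a value occurring at most once has a unique index
theorem index_unique {xs : List Int} {t : Int} (hc : xs.count t ≤ 1) :
    ∀ i j : Nat, (hi : i < xs.length) → (hj : j < xs.length) →
      xs[i] = t → xs[j] = t → i = j := by
  induction xs with
  | nil => intro i j hi; simp at hi
  | cons a l ih =>
    intro i j hi hj hit hjt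
    match i, j with
    | 0, 0 => rfl
    | 0, j + 1 =>
      exfalso
      have ha : a = t := by simpa using hit
      have hj' : j < l.length := by simpa using hj
      have hmem : t ∈ l := by
        have : l[j] = t := by simpa using hjt
        exact this ▸ List.getElem_mem _
      have h2 : 0 < l.count t := List.count_pos_iff.mpr hmem
      subst ha
      rw [List.count_cons_self] at hc
      omega
    | i + 1, 0 =>
      exfalso
      have ha : a = t := by simpa using hjt
      have hi' : i < l.length := by simpa using hi
      have hmem : t ∈ l := by
        have : l[i] = t := by simpa using hit
        exact this ▸ List.getElem_mem _
      have h2 : 0 < l.count t := List.count_pos_iff.mpr hmem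
      subst ha
      rw [List.count_cons_self] at hc
      omega
    | i + 1, j + 1 =>
      have hc' : l.count t ≤ 1 := le_trans List.count_le_count_cons hc
      have := ih hc' i j (by simpa using hi) (by simpa using hj)
        (by simpa using hit) (by simpa using hjt)
      omega

-- ===== VERDICT (by name: the statement is the Claim_ definition above) =====
theorem search_spec : Claim_equal_search := by
  intro nums t _hdom hpre
  simp only [Spec_search, search, search_alt]
  set xs := PySem.List.sorted nums (fun x => x) false with hxs
  have hs : xs.Pairwise (· ≤ ·) := by
    rw [hxs]; exact PySem.List.sorted_pairwise nums (fun x => x)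
  have hperm : xs.Perm nums := by
    rw [hxs]; exact PySem.List.sorted_perm nums (fun x => x) false
  have hc : xs.count t ≤ 1 := by rw [hperm.count_eq]; exact hpre
  rcases searchGo_char xs t hs (xs.length + 1) 0 ((xs.length : Int) - 1) (by omega) (by omega)
      (by omega) (fun i hi hit => by omega) with ⟨hA, hnone⟩ | ⟨i, hi, hAi, hxi⟩
  · rw [hA]
    have hnm : t ∉ xs := by
      intro hmem
      obtain ⟨j, hj, hjt⟩ := List.mem_iff_getElem.mp hmem
      exact hnone j hj hjt
    rw [(PySem.List.index?_eq_none_iff xs t).mpr hnm]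
  · rw [hAi]
    have hmem : t ∈ xs := hxi ▸ List.getElem_mem _
    obtain ⟨j, hj⟩ := Option.isSome_iff_exists.mp ((PySem.List.index?_isSome_iff xs t).mpr hmem)
    rw [hj]
    obtain ⟨hjlen, hjt, _⟩ := PySem.List.getElem_of_index?_eq_some hj
    rw [index_unique hc i j hi hjlen hxi hjt]
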